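-- pv_equiv track=rewrite | github.com/Hangary/CS440-3 | mp2-code/solve.py | find_least
-- ===== SOURCE A (Python) =====
-- def find_least(cor_dict):
--     smallest = None
--     for coor in cor_dict.keys():
--         if len(cor_dict[coor]) == 0:
--             return None
--         if smallest == None:
--             smallest = coor
--             continue
--         if len(cor_dict[coor]) < len(cor_dict[smallest]):
--             smallest = coor
--     return smallest
-- ===== SOURCE B (Python) =====
-- def find_least(cor_dict):
--     items = sorted(cor_dict.items(), key=lambda kv: len(kv[1]))
--     if not items or len(items[0][1]) == 0:
--         return None
--     return items[0][0]
-- ===== Notes on version B (the rewrite author's own statement) =====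
-- stated objective: alternative
-- what changed: A's fused early-returning running-minimum scan is replaced by one stable sort of the items by value length and an inspection of the head: the head is the first key of minimal value length, and its value is empty iff any value is empty.
import Mathlib
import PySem

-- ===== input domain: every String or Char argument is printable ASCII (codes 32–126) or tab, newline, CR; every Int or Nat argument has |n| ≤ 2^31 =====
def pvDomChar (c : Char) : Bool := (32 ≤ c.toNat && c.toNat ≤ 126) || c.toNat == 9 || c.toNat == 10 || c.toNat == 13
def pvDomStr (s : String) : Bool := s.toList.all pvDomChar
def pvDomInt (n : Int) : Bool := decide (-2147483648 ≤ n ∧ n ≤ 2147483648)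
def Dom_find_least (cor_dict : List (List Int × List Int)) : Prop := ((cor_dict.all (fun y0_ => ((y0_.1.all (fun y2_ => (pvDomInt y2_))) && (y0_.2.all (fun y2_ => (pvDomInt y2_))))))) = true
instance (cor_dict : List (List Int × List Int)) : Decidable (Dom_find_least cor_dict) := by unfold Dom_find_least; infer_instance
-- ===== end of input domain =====

-- B replaces A's fused early-returning running-minimum scan by one stable sort of the
-- items by value length plus an inspection of the sorted head (alternative algorithm).


-- ===== PORT A =====
-- len(cor_dict[coor]) : dict lookup (first match on the association list) then length
def pvKeyLen (d : List (List Int × List Int)) (k : List Int) : Nat :=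
  ((PySem.Dict.mk d).getD k []).length

-- the 'for coor in cor_dict.keys()' loop with its 'smallest' state and early return
def find_least_go (d : List (List Int × List Int)) :
    List (List Int) → Option (List Int) → Option (List Int)
  | [], smallest => smallest
  | coor :: rest, smallest =>
    if pvKeyLen d coor = 0 then none
    else
      match smallest with
      | none => find_least_go d rest (some coor)
      | some s =>
        if pvKeyLen d coor < pvKeyLen d s then find_least_go d rest (some coor)
        else find_least_go d rest (some s)

def find_least (cor_dict : List (List Int × List Int)) : Option (List Int) :=
  find_least_go cor_dict (cor_dict.map (·.1)) none

-- ===== PORT B =====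
-- items = sorted(cor_dict.items(), key=lambda kv: len(kv[1])); then inspect items[0]
def find_least_alt (cor_dict : List (List Int × List Int)) : Option (List Int) :=
  match PySem.List.sorted cor_dict (fun kv => kv.2.length) with
  | [] => none
  | (k, v) :: _ => if v.length = 0 then none else some k

-- ===== PRECONDITION & SPEC =====
-- Pre_ excludes association lists with duplicate keys: a Python dict collapses duplicates
-- before either function runs, so such lists do not correspond to any dict input.
def Pre_find_least (cor_dict : List (List Int × List Int)) : Prop :=
  (cor_dict.map Prod.fst).Nodup
instance (cor_dict : List (List Int × List Int)) : Decidable (Pre_find_least cor_dict) := by unfold Pre_find_least; infer_instance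

def pvWitness_find_least : (List (List Int × List Int)) := [([1], [2]), ([0], [3, 4])]

def Spec_find_least (cor_dict : List (List Int × List Int)) (out : Option (List Int)) : Prop := out = find_least_alt cor_dict
instance (cor_dict : List (List Int × List Int)) (out : Option (List Int)) : Decidable (Spec_find_least cor_dict out) := by unfold Spec_find_least; infer_instance

-- ===== CLAIM (what is proved, stated in full; the proofs are below) =====
def Claim_equal_find_least : Prop := ∀ (cor_dict : List (List Int × List Int)), Dom_find_least cor_dict → Pre_find_least cor_dict → Spec_find_least cor_dict (find_least cor_dict)

-- ===== LEMMAS AND PROOFS =====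

-- the running-minimum step on whole items (strict-< replacement, i.e. first minimum wins)
def pvItemStep (o : Option (List Int × List Int)) (x : List Int × List Int) :
    Option (List Int × List Int) :=
  match o with
  | none => some x
  | some h => if x.2.length < h.2.length then some x else some h

-- under distinct keys, the dict lookup of a present key returns its paired value
theorem pv_lookup_of_mem {d : List (List Int × List Int)} (hnd : (d.map Prod.fst).Nodup)
    {k v : List Int} (h : (k, v) ∈ d) :
    (PySem.Dict.mk d).get? k = some v := by
  induction d with
  | nil => cases h
  | cons p t ih =>
    simp only [PySem.Dict.get?, List.find?]
    rcases List.mem_cons.mp h with h1 | h2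
    · subst h1; simp
    · have hne : p.1 ≠ k := by
        intro he
        have : k ∈ t.map Prod.fst := List.mem_map.mpr ⟨(k, v), h2, rfl⟩
        simp only [List.map_cons, List.nodup_cons] at hnd
        exact hnd.1 (he ▸ this)
      have : (p.1 == k) = false := by simp [hne]
      rw [this]
      have hnd' : (t.map Prod.fst).Nodup := by
        simp only [List.map_cons, List.nodup_cons] at hnd; exact hnd.2
      simpa [PySem.Dict.get?] using ih hnd' h2

theorem pvKeyLen_of_mem {d : List (List Int × List Int)} (hnd : (d.map Prod.fst).Nodup)
    {k v : List Int} (h : (k, v) ∈ d) : pvKeyLen d k = v.length := by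
  simp [pvKeyLen, PySem.Dict.getD, pv_lookup_of_mem hnd h]

-- if every listed key has a nonempty value, A's loop is exactly the running-minimum fold
theorem pv_go_eq_foldl (d : List (List Int × List Int)) (ks : List (List Int))
    (hk : ∀ k ∈ ks, pvKeyLen d k ≠ 0) (acc : Option (List Int)) :
    find_least_go d ks acc =
      ks.foldl (fun acc x =>
        match acc with
        | none => some x
        | some m => if pvKeyLen d x < pvKeyLen d m then some x else some m) acc := by
  induction ks generalizing acc with
  | nil => rfl
  | cons k t ih =>
    have hk0 : pvKeyLen d k ≠ 0 := hk k (List.mem_cons_self)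
    have ht : ∀ x ∈ t, pvKeyLen d x ≠ 0 := fun x hx => hk x (List.mem_cons_of_mem _ hx)
    simp only [find_least_go, if_neg hk0, List.foldl_cons]
    cases acc with
    | none => exact ih ht _
    | some s =>
      dsimp only
      by_cases hlt : pvKeyLen d k < pvKeyLen d s
      · rw [if_pos hlt, if_pos hlt]; exact ih ht _
      · rw [if_neg hlt, if_neg hlt]; exact ih ht _

-- if some listed key has an empty value, A's loop returns none
theorem pv_go_none (d : List (List Int × List Int)) (ks : List (List Int))
    (hk : ∃ k ∈ ks, pvKeyLen d k = 0) (acc : Option (List Int)) :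
    find_least_go d ks acc = none := by
  induction ks generalizing acc with
  | nil => rcases hk with ⟨k, hk, _⟩; cases hk
  | cons k t ih =>
    by_cases h0 : pvKeyLen d k = 0
    · simp [find_least_go, h0]
    · have ht : ∃ x ∈ t, pvKeyLen d x = 0 := by
        rcases hk with ⟨x, hx, hx0⟩
        rcases List.mem_cons.mp hx with rfl | hx'
        · exact absurd hx0 h0
        · exact ⟨x, hx', hx0⟩
      simp only [find_least_go, if_neg h0]
      cases acc with
      | none => exact ih ht _
      | some s =>
        dsimp only
        by_cases hlt : pvKeyLen d k < pvKeyLen d s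
        · rw [if_pos hlt]; exact ih ht _
        · rw [if_neg hlt]; exact ih ht _

-- inserting into a stable-sort accumulator changes the head exactly as the fused
-- running-minimum step does (strict-<: new element wins only when strictly smaller)
theorem pv_head_insertBy (x : List Int × List Int) (acc : List (List Int × List Int)) :
    (PySem.List.insertBy
        (fun a b => decide ((fun kv : List Int × List Int => kv.2.length) a
                          < (fun kv : List Int × List Int => kv.2.length) b)) x acc).head?
      = pvItemStep acc.head? x := by
  cases acc with
  | nil => rfl
  | cons y t =>
    simp only [PySem.List.insertBy, pvItemStep, List.head?]
    by_cases h : x.2.length < y.2.length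
    · simp [h]
    · simp [h]

-- hence the head of the insertion-sort fold is the running-minimum fold over items
theorem pv_head_foldl_insertBy (l : List (List Int × List Int))
    (acc : List (List Int × List Int)) :
    (l.foldl (fun acc x =>
        PySem.List.insertBy
          (fun a b => decide ((fun kv : List Int × List Int => kv.2.length) a
                            < (fun kv : List Int × List Int => kv.2.length) b)) x acc) acc).head?
      = l.foldl pvItemStep acc.head? := by
  induction l generalizing acc with
  | nil => rfl
  | cons x t ih =>
    simp only [List.foldl_cons]
    rw [ih, pv_head_insertBy]

-- the key-level fold A performs equals the item-level fold, projected to the key,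
-- when every compared key looks up to its own paired value
theorem pv_keyfold_eq_itemfold (d : List (List Int × List Int))
    (l : List (List Int × List Int)) (o : Option (List Int × List Int))
    (hl : ∀ x ∈ l, pvKeyLen d x.1 = x.2.length)
    (ho : ∀ h, o = some h → pvKeyLen d h.1 = h.2.length) :
    l.foldl (fun acc x =>
        match acc with
        | none => some x.1
        | some m => if pvKeyLen d x.1 < pvKeyLen d m then some x.1 else some m)
      (o.map (·.1))
      = (l.foldl pvItemStep o).map (·.1) := by
  induction l generalizing o with
  | nil => rfl
  | cons x t ih =>
    have hx : pvKeyLen d x.1 = x.2.length := hl x (List.mem_cons_self)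
    have ht : ∀ y ∈ t, pvKeyLen d y.1 = y.2.length := fun y hy => hl y (List.mem_cons_of_mem _ hy)
    simp only [List.foldl_cons]
    cases o with
    | none =>
      exact ih (some x) ht (by intro h' he; cases he; exact hx)
    | some h =>
      have hh : pvKeyLen d h.1 = h.2.length := ho h rfl
      simp only [Option.map_some, pvItemStep]
      by_cases hlt : x.2.length < h.2.length
      · rw [if_pos (by rw [hx, hh]; exact hlt), if_pos hlt]
        exact ih (some x) ht (by intro h'' he; cases he; exact hx)
      · rw [if_neg (by rw [hx, hh]; exact hlt), if_neg hlt]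
        exact ih (some h) ht (by intro h'' he; cases he; exact hh)

-- ===== VERDICT (by name: the statement is the Claim_ definition above) =====
theorem find_least_spec : Claim_equal_find_least := by
  intro d _ hnd
  unfold Spec_find_least find_least find_least_alt
  by_cases hemp : ∃ q ∈ d, q.2.length = 0
  · -- some value is empty: both return none
    rcases hemp with ⟨⟨k, v⟩, hq, hv⟩
    have hk0 : pvKeyLen d k = 0 := by rw [pvKeyLen_of_mem hnd hq]; exact hv
    rw [pv_go_none d _ ⟨k, List.mem_map.mpr ⟨(k, v), hq, rfl⟩, hk0⟩]
    rcases hs : PySem.List.sorted d (fun kv => kv.2.length) with _ | ⟨⟨mk, mv⟩, t⟩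
    · rfl
    · have hle := PySem.List.key_head_sorted_le d (fun kv => kv.2.length) hs (k, v) hq
      simp only at hle
      have hvl : v.length = 0 := hv
      have : mv.length = 0 := by omega
      simp [this]
  · -- no value is empty: both return the first key of minimal value length
    simp only [not_exists, not_and] at hemp
    have hks : ∀ k ∈ d.map (fun x => x.1), pvKeyLen d k ≠ 0 := by
      rintro k hk
      rcases List.mem_map.mp hk with ⟨⟨k', v⟩, hq, rfl⟩
      rw [pvKeyLen_of_mem hnd hq]
      exact hemp _ hq
    rw [pv_go_eq_foldl d _ hks none, List.foldl_map]
    have hitems : ∀ x ∈ d, pvKeyLen d x.1 = x.2.length := by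
      rintro ⟨k, v⟩ hq; exact pvKeyLen_of_mem hnd hq
    have hA := pv_keyfold_eq_itemfold d d none hitems (by rintro h ⟨⟩)
    simp only [Option.map_none] at hA
    rw [hA]
    have hB : (PySem.List.sorted d (fun kv : List Int × List Int => kv.2.length)).head?
        = d.foldl pvItemStep none := by
      rw [PySem.List.sorted_eq_foldl_insertBy d (fun kv => kv.2.length)]
      exact pv_head_foldl_insertBy d []
    rcases hs : PySem.List.sorted d (fun kv => kv.2.length) with _ | ⟨⟨mk, mv⟩, t⟩
    · have hd : d = [] := (PySem.List.sorted_eq_nil_iff d _ _).mp hs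
      subst hd; rfl
    · have hmem : (mk, mv) ∈ d := by
        rw [← PySem.List.mem_sorted d (fun kv => kv.2.length) false, hs]
        exact List.mem_cons_self
      have hnz : mv.length ≠ 0 := hemp _ hmem
      rw [hs] at hB
      simp only [List.head?] at hB
      rw [← hB]
      simp [hnz]
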